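-- pv_equiv track=rewrite | github.com/AI-for-Toxicity/PaperDataExtraction | src/display_results.py | _build_normalized_index_map
-- ===== SOURCE A (Python) =====
-- def _build_normalized_index_map(original: str) -> tuple[str, list[int]]:
--     """
--     Convert original text to normalized text while keeping a map:
--     normalized_char_index -> original_char_index
--
--     This lets us find in normalized text and jump back to the
--     correct position in the original QTextDocument plain text.
--     """
--     original = original.replace("\r\n", "\n").replace("\r", "\n")
--
--     out = []
--     index_map = []
--
--     i = 0
--     last_was_space = False
--
--     while i < len(original):
--         ch = original[i]
--
--         if ch.isspace():
--             if out and not last_was_space: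
--                 out.append(" ")
--                 index_map.append(i)
--             last_was_space = True
--         else:
--             out.append(ch)
--             index_map.append(i)
--             last_was_space = False
--
--         i += 1
--
--     normalized = "".join(out).strip()
--
--     # If strip removed leading/trailing spaces, trim index_map too
--     left_trim = 0
--     while left_trim < len(out) and out[left_trim] == " ":
--         left_trim += 1
--
--     right_trim = len(out)
--     while right_trim > left_trim and out[right_trim - 1] == " ":
--         right_trim -= 1
--
--     index_map = index_map[left_trim:right_trim]
--
--     return normalized, index_map
-- ===== SOURCE B (Python) =====
-- def _build_normalized_index_map(original: str) -> tuple[str, list[int]]: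
--     original = original.replace("\r\n", "\n").replace("\r", "\n")
--     n = len(original)
--     # Phase 1: split into maximal non-whitespace runs (words), remembering
--     # each word's start index; each inter-word gap's first whitespace char
--     # sits right after the previous word.
--     words = []   # (start_index, word_text)
--     gaps = []    # index of the first whitespace char of each inter-word gap
--     i = 0
--     while i < n:
--         if original[i].isspace():
--             i += 1
--             continue
--         start = i
--         buf = []
--         while i < n and not original[i].isspace():
--             buf.append(original[i])
--             i += 1
--         if words:
--             s_prev, w_prev = words[-1]
--             gaps.append(s_prev + len(w_prev))
--         words.append((start, "".join(buf)))
--     # Phase 2: join words with single spaces; leading/trailing whitespace is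
--     # simply never emitted, so no strip/trim step is needed.
--     if not words:
--         return "", []
--     s0, w0 = words[0]
--     out = [w0]
--     index_map = list(range(s0, s0 + len(w0)))
--     for (s, w), g in zip(words[1:], gaps):
--         out.append(" ")
--         index_map.append(g)
--         out.append(w)
--         index_map.extend(range(s, s + len(w)))
--     return "".join(out), index_map
-- ===== Notes on version B (the rewrite author's own statement) =====
-- stated objective: alternative
-- what changed: A is a single char-by-char state machine (last_was_space flag) that may emit a trailing space and therefore post-processes with strip() plus left/right index-map trimming; B instead splits the text into (start,word) runs and gap positions in one scan and then joins the words with single spaces, so leading/trailing whitespace is never emitted and no strip/trim step exists.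
import Mathlib
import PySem

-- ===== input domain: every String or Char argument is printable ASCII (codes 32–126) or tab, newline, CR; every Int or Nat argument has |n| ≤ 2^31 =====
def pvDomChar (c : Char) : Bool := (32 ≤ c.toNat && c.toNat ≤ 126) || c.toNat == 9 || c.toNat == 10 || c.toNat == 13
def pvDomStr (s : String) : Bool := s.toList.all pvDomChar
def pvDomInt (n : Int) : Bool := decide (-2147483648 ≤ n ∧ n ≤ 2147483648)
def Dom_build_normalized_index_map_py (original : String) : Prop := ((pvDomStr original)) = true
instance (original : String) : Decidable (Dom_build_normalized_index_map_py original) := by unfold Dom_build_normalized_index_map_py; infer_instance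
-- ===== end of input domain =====

-- B replaces A's char-by-char state machine (last_was_space flag + post-strip/trim) by a
-- two-phase decomposition: collect (word, start-index) runs and gap positions, then join; same cost class.

-- ===== PORT A =====
-- while i < len(original): … (loop over the remaining characters, i the running index)
def pvALoop : List Char → Nat → List Char → List Int → Bool → List Char × List Int
  | [], _, out, imap, _ => (out, imap)
  | c :: rest, i, out, imap, lws =>
    if PySem.Chars.isspace c then
      if out ≠ [] ∧ lws = false then pvALoop rest (i+1) (out ++ [' ']) (imap ++ [(i : Int)]) true
      else pvALoop rest (i+1) out imap true
    else pvALoop rest (i+1) (out ++ [c]) (imap ++ [(i : Int)]) false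

-- while left_trim < len(out) and out[left_trim] == " ": left_trim += 1
def pvALeftTrim : List Char → Nat → Nat
  | [], n => n
  | c :: r, n => if c = ' ' then pvALeftTrim r (n+1) else n

-- while right_trim > left_trim and out[right_trim - 1] == " ": right_trim -= 1
def pvARightTrim (out : List Char) (lt : Nat) (rt : Nat) : Nat :=
  if lt < rt ∧ PySem.List.pyGet? out ((rt : Int) - 1) = some ' ' then pvARightTrim out lt (rt - 1)
  else rt
termination_by rt
decreasing_by omega

def build_normalized_index_map_py (original : String) : String × List Int :=
  -- original.replace("\r\n","\n").replace("\r","\n"), kept as a char list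
  let o := PySem.Chars.replace (PySem.Chars.replace original.toList ['\r', '\n'] ['\n']) ['\r'] ['\n']
  let p := pvALoop o 0 [] [] false
  -- "".join(out).strip()  (out is a list of single characters)
  let normalized := String.ofList (PySem.Chars.strip p.1)
  let lt := pvALeftTrim p.1 0
  let rt := pvARightTrim p.1 lt p.1.length
  (normalized, PySem.List.slice p.2 (some (lt : Int)) (some (rt : Int)))

-- ===== PORT B =====
-- inner word loop: while i < n and not original[i].isspace(): buf.append(original[i]); i += 1
-- returns (buf, i after the loop, remaining characters)
def pvBTakeWord : List Char → Nat → List Char × Nat × List Char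
  | [], i => ([], i, [])
  | c :: rest, i =>
    if PySem.Chars.isspace c then ([], i, c :: rest)
    else
      let p := pvBTakeWord rest (i+1)
      (c :: p.1, p.2.1, p.2.2)

-- termination helper for the outer scan (the word loop only consumes characters)
theorem pvBTakeWord_rest_len : ∀ (cs : List Char) (i : Nat), (pvBTakeWord cs i).2.2.length ≤ cs.length := by
  intro cs
  induction cs with
  | nil => intro i; simp [pvBTakeWord]
  | cons c rest ih =>
    intro i
    by_cases h : PySem.Chars.isspace c
    · simp [pvBTakeWord, h]
    · simp only [pvBTakeWord, h, if_neg, Bool.false_eq_true, not_false_eq_true, if_false]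
      exact le_trans (ih (i+1)) (by simp)

-- outer scan: split into maximal non-whitespace runs (words) and record gap starts
def pvBScan : List Char → Nat → List (Nat × List Char) → List Nat → List (Nat × List Char) × List Nat
  | [], _, words, gaps => (words, gaps)
  | c :: rest, i, words, gaps =>
    if PySem.Chars.isspace c then pvBScan rest (i+1) words gaps
    else
      let p := pvBTakeWord rest (i+1)   -- word continues with original[start] = c already read
      let gaps' := match words.getLast? with
        | none => gaps
        | some (sp, wp) => gaps ++ [sp + wp.length]
      pvBScan p.2.2 p.2.1 (words ++ [(i, c :: p.1)]) gaps'
termination_by cs => cs.length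
decreasing_by
  all_goals have := pvBTakeWord_rest_len rest (i+1)
  all_goals simp
  all_goals omega

def build_normalized_index_map_py_alt (original : String) : String × List Int :=
  let o := PySem.Chars.replace (PySem.Chars.replace original.toList ['\r', '\n'] ['\n']) ['\r'] ['\n']
  let wg := pvBScan o 0 [] []
  match wg.1, wg.2 with
  | [], _ => ("", [])
  | (s0, w0) :: rest, gaps =>
    -- list(range(s0, s0 + len(w0))) is List.range' s0 w0.length (naturals, step 1), cast to Int
    let init : List Char × List Int := (w0, (List.range' s0 w0.length).map (fun k => (k : Int)))
    let p := (rest.zip gaps).foldl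
      (fun acc q =>
        (acc.1 ++ [' '] ++ q.1.2,
         acc.2 ++ [(q.2 : Int)] ++ (List.range' q.1.1 q.1.2.length).map (fun k => (k : Int))))
      init
    (String.ofList p.1, p.2)

-- ===== PRECONDITION & SPEC =====
def Spec_build_normalized_index_map_py (original : String) (out : String × List Int) : Prop := out = build_normalized_index_map_py_alt original
instance (original : String) (out : String × List Int) : Decidable (Spec_build_normalized_index_map_py original out) := by unfold Spec_build_normalized_index_map_py; infer_instance

-- ===== CLAIM (what is proved, stated in full; the proofs are below) =====
def Claim_equal_build_normalized_index_map_py : Prop := ∀ (original : String), Dom_build_normalized_index_map_py original → Spec_build_normalized_index_map_py original (build_normalized_index_map_py original)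

-- ===== LEMMAS AND PROOFS =====

-- spec-side vocabulary: words of the input as (start index, characters)
def pvSpans : List Char → Nat → List (Nat × List Char)
  | [], _ => []
  | c :: rest, i =>
    if PySem.Chars.isspace c then pvSpans rest (i+1)
    else
      let p := pvBTakeWord rest (i+1)
      (i, c :: p.1) :: pvSpans p.2.2 p.2.1
termination_by cs => cs.length
decreasing_by
  all_goals have := pvBTakeWord_rest_len rest (i+1)
  all_goals simp
  all_goals omega

def pvIdxs (s : Nat) (w : List Char) : List Int := (List.range' s w.length).map (fun k => (k : Int))

def pvTail : Nat → List (Nat × List Char) → List Char × List Int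
  | _, [] => ([], [])
  | pe, (s, w) :: r => (' ' :: w ++ (pvTail (s + w.length) r).1,
                        (pe : Int) :: pvIdxs s w ++ (pvTail (s + w.length) r).2)

def pvGlue : List (Nat × List Char) → List Char × List Int
  | [] => ([], [])
  | (s, w) :: r => (w ++ (pvTail (s + w.length) r).1, pvIdxs s w ++ (pvTail (s + w.length) r).2)

def pvEndsWS (cs : List Char) : Bool :=
  match cs.getLast? with
  | none => false
  | some c => PySem.Chars.isspace c

def pvLastEnd : List (Nat × List Char) → Nat
  | [] => 0
  | [(s, w)] => s + w.length
  | _ :: r => pvLastEnd r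

-- what A's loop produces (before strip/trim)
def pvARes (cs : List Char) (i : Nat) : List Char × List Int :=
  match pvSpans cs i with
  | [] => ([], [])
  | sp =>
    let g := pvGlue sp
    if pvEndsWS cs then (g.1 ++ [' '], g.2 ++ [(pvLastEnd sp : Int)]) else g

-- A's loop continuation from a state with nonempty out (lws the flag)
def pvCont : Bool → List Char → Nat → List Char × List Int
  | _, [], _ => ([], [])
  | lws, c :: rest, i =>
    if PySem.Chars.isspace c then
      if lws then pvCont true rest (i+1)
      else (' ' :: (pvCont true rest (i+1)).1, (i : Int) :: (pvCont true rest (i+1)).2)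
    else (c :: (pvCont false rest (i+1)).1, (i : Int) :: (pvCont false rest (i+1)).2)

-- gaps as B records them, given the previous word (if any)
def pvGapsAfter : Option (Nat × List Char) → List (Nat × List Char) → List Nat
  | _, [] => []
  | none, (s, w) :: r => pvGapsAfter (some (s, w)) r
  | some (sp, wp), (s, w) :: r => (sp + wp.length) :: pvGapsAfter (some (s, w)) r

-- ---- small helpers ----
def pvWordsWF (sp : List (Nat × List Char)) : Prop :=
  ∀ p ∈ sp, p.2 ≠ [] ∧ ∀ c ∈ p.2, PySem.Chars.isspace c = false

theorem pvIdxs_cons (s : Nat) (c : Char) (w : List Char) :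
    pvIdxs s (c :: w) = (s : Int) :: pvIdxs (s+1) w := by
  simp [pvIdxs, List.range'_succ]

theorem pvIdxs_len (s : Nat) (w : List Char) : (pvIdxs s w).length = w.length := by
  simp [pvIdxs]

theorem pvTail_glue (pe s : Nat) (w : List Char) (r : List (Nat × List Char)) :
    pvTail pe ((s, w) :: r) = (' ' :: (pvGlue ((s, w) :: r)).1, (pe : Int) :: (pvGlue ((s, w) :: r)).2) := by
  simp [pvTail, pvGlue]

theorem pvGetLast?_append (l1 l2 : List Char) (h : l2 ≠ []) :
    (l1 ++ l2).getLast? = l2.getLast? := by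
  rw [← List.head?_reverse, ← List.head?_reverse, List.reverse_append]
  cases hr : l2.reverse with
  | nil => exact absurd (by simpa using hr) h
  | cons a t => simp [hr]

theorem pvEndsWS_append (l1 l2 : List Char) (h : l2 ≠ []) :
    pvEndsWS (l1 ++ l2) = pvEndsWS l2 := by
  unfold pvEndsWS
  rw [pvGetLast?_append l1 l2 h]

theorem pvEndsWS_cons (c : Char) (l : List Char) (h : l ≠ []) :
    pvEndsWS (c :: l) = pvEndsWS l := by
  have h1 : c :: l = [c] ++ l := rfl
  rw [h1, pvEndsWS_append [c] l h]

theorem pvEndsWS_nonws (l : List Char) (hne : l ≠ []) (h : ∀ x ∈ l, PySem.Chars.isspace x = false) :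
    pvEndsWS l = false := by
  unfold pvEndsWS
  cases hl : l.getLast? with
  | none => rfl
  | some a =>
      have : a ∈ l := List.mem_of_getLast? hl
      simp [h a this]

theorem pvEndsWS_allws (l : List Char) (hne : l ≠ []) (h : ∀ x ∈ l, PySem.Chars.isspace x = true) :
    pvEndsWS l = true := by
  unfold pvEndsWS
  cases hl : l.getLast? with
  | none => exact absurd (List.getLast?_eq_none_iff.mp hl) hne
  | some a =>
      have : a ∈ l := List.mem_of_getLast? hl
      simp [h a this]

theorem pvLastEnd_cons (x : Nat × List Char) (sp : List (Nat × List Char)) (h : sp ≠ []) :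
    pvLastEnd (x :: sp) = pvLastEnd sp := by
  cases sp with
  | nil => exact absurd rfl h
  | cons y r => rfl

theorem pvARes_nil (cs : List Char) (i : Nat) (h : pvSpans cs i = []) : pvARes cs i = ([], []) := by
  unfold pvARes; rw [h]

theorem pvARes_cons (cs : List Char) (i s : Nat) (w : List Char) (r : List (Nat × List Char))
    (h : pvSpans cs i = (s, w) :: r) :
    pvARes cs i =
      (if pvEndsWS cs then
        ((pvGlue ((s, w) :: r)).1 ++ [' '], (pvGlue ((s, w) :: r)).2 ++ [(pvLastEnd ((s, w) :: r) : Int)])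
       else pvGlue ((s, w) :: r)) := by
  unfold pvARes; rw [h]

theorem pvGapsAfter_none_cons (s : Nat) (w : List Char) (r : List (Nat × List Char)) :
    pvGapsAfter none ((s, w) :: r) = pvGapsAfter (some (s, w)) r := rfl

theorem pvStrip_id (l : List Char)
    (hh : ∀ c, l.head? = some c → PySem.Chars.isspace c = false)
    (hl : ∀ c, l.getLast? = some c → PySem.Chars.isspace c = false) :
    PySem.Chars.strip l = l := by
  unfold PySem.Chars.strip PySem.Chars.rstrip PySem.Chars.lstrip
  have h1 : List.dropWhile PySem.Chars.isspace l = l := by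
    cases l with
    | nil => rfl
    | cons a t => simp [hh a rfl]
  rw [h1]
  cases hr : l.reverse with
  | nil => simp_all
  | cons a t =>
      have ha : l.getLast? = some a := by rw [← List.head?_reverse, hr]; rfl
      rw [List.dropWhile_cons]
      simp only [hl a ha, Bool.false_eq_true, if_false]
      rw [← hr, List.reverse_reverse]

theorem pvStrip_trailing (l : List Char) (hc : Char) (t : List Char) (hG : l = hc :: t)
    (hh : PySem.Chars.isspace hc = false)
    (hl : ∀ c, l.getLast? = some c → PySem.Chars.isspace c = false) :
    PySem.Chars.strip (l ++ [' ']) = l := by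
  unfold PySem.Chars.strip PySem.Chars.rstrip PySem.Chars.lstrip
  have h1 : List.dropWhile PySem.Chars.isspace (l ++ [' ']) = l ++ [' '] := by
    subst hG; simp [hh]
  rw [h1, List.reverse_append]
  have hsp : PySem.Chars.isspace ' ' = true := by decide
  simp only [List.reverse_singleton, List.singleton_append, List.dropWhile_cons, hsp, if_true]
  cases hr : l.reverse with
  | nil => simp [hG] at hr
  | cons a r =>
      have ha : l.getLast? = some a := by rw [← List.head?_reverse, hr]; rfl
      rw [List.dropWhile_cons]
      simp only [hl a ha, Bool.false_eq_true, if_false]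
      rw [← hr, List.reverse_reverse]

theorem pvARightTrim_noTrail (G1 : List Char) (lc : Char)
    (h : G1.getLast? = some lc) (h2 : lc ≠ ' ') :
    pvARightTrim G1 0 G1.length = G1.length := by
  rw [pvARightTrim]
  rw [if_neg]
  rintro ⟨hlt, hget⟩
  have hne : G1 ≠ [] := by intro he; subst he; simp at h
  have hlen : 1 ≤ G1.length := by cases G1 with | nil => simp at hne | cons a r => simp
  have hcast : ((G1.length : Int) - 1) = ((G1.length - 1 : Nat) : Int) := by omega
  rw [hcast, PySem.List.pyGet?_natCast] at hget
  rw [List.getLast?_eq_getElem?] at h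
  rw [h] at hget
  exact h2 (Option.some.inj hget)

theorem pvARightTrim_trail (G1 : List Char) (lc : Char) (hne : G1 ≠ [])
    (h : G1.getLast? = some lc) (h2 : lc ≠ ' ') :
    pvARightTrim (G1 ++ [' ']) 0 (G1.length + 1) = G1.length := by
  have hlen : 1 ≤ G1.length := by cases G1 with | nil => simp at hne | cons a r => simp
  rw [pvARightTrim]
  rw [if_pos]
  · have hstep : G1.length + 1 - 1 = G1.length := by omega
    rw [hstep, pvARightTrim, if_neg]
    rintro ⟨hlt, hget⟩
    have hcast : ((G1.length : Int) - 1) = ((G1.length - 1 : Nat) : Int) := by omega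
    rw [hcast, PySem.List.pyGet?_natCast] at hget
    rw [List.getElem?_append_left (by omega)] at hget
    rw [List.getLast?_eq_getElem?, hget] at h
    exact h2 (Option.some.inj h).symm
  · constructor
    · omega
    · have hcast : (((G1.length + 1 : Nat) : Int) - 1) = ((G1.length : Nat) : Int) := by omega
      rw [hcast, PySem.List.pyGet?_natCast]
      simp

-- ---- basic facts about pvBTakeWord ----
theorem pvBTakeWord_split : ∀ (cs : List Char) (i : Nat),
    cs = (pvBTakeWord cs i).1 ++ (pvBTakeWord cs i).2.2 := by
  intro cs
  induction cs with
  | nil => intro i; simp [pvBTakeWord]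
  | cons c rest ih =>
    intro i
    by_cases h : PySem.Chars.isspace c = true
    · simp [pvBTakeWord, h]
    · simp only [pvBTakeWord, h, Bool.false_eq_true, if_false, List.cons_append, List.cons.injEq,
        true_and]
      exact ih (i+1)

theorem pvBTakeWord_end : ∀ (cs : List Char) (i : Nat),
    (pvBTakeWord cs i).2.1 = i + (pvBTakeWord cs i).1.length := by
  intro cs
  induction cs with
  | nil => intro i; simp [pvBTakeWord]
  | cons c rest ih =>
    intro i
    by_cases h : PySem.Chars.isspace c = true
    · simp [pvBTakeWord, h]
    · simp only [pvBTakeWord, h, Bool.false_eq_true, if_false, List.length_cons]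
      rw [ih (i+1)]
      omega

theorem pvBTakeWord_chars : ∀ (cs : List Char) (i : Nat) (c : Char),
    c ∈ (pvBTakeWord cs i).1 → PySem.Chars.isspace c = false := by
  intro cs
  induction cs with
  | nil => intro i c hc; simp [pvBTakeWord] at hc
  | cons a rest ih =>
    intro i c hc
    by_cases h : PySem.Chars.isspace a = true
    · simp [pvBTakeWord, h] at hc
    · simp only [pvBTakeWord, h, Bool.false_eq_true, if_false, List.mem_cons] at hc
      rcases hc with rfl | hc
      · simpa using h
      · exact ih (i+1) c hc

theorem pvBTakeWord_rest_head : ∀ (cs : List Char) (i : Nat) (d : Char) (r : List Char),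
    (pvBTakeWord cs i).2.2 = d :: r → PySem.Chars.isspace d = true := by
  intro cs
  induction cs with
  | nil => intro i d r h; simp [pvBTakeWord] at h
  | cons a rest ih =>
    intro i d r h
    by_cases hws : PySem.Chars.isspace a = true
    · simp only [pvBTakeWord, hws, if_true] at h
      injection h with h1 h2
      exact h1 ▸ hws
    · simp only [pvBTakeWord, hws, Bool.false_eq_true, if_false] at h
      exact ih (i+1) d r h

-- ---- A-side characterization ----
theorem pvALoop_app : ∀ (cs : List Char) (i : Nat) (out : List Char) (imap : List Int) (lws : Bool),
    out ≠ [] →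
    pvALoop cs i out imap lws = (out ++ (pvCont lws cs i).1, imap ++ (pvCont lws cs i).2) := by
  intro cs
  induction cs with
  | nil => intro i out imap lws h; simp [pvALoop, pvCont]
  | cons c rest ih =>
    intro i out imap lws hout
    by_cases hws : PySem.Chars.isspace c = true
    · cases lws with
      | true =>
          simp only [pvALoop, pvCont, hws, if_true]
          rw [if_neg (by simp)]
          exact ih (i+1) out imap true hout
      | false =>
          simp only [pvALoop, pvCont, hws, if_true]
          rw [if_pos ⟨hout, trivial⟩]
          rw [ih (i+1) (out ++ [' ']) (imap ++ [(i : Int)]) true (by simp)]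
          simp
    · simp only [pvALoop, pvCont, hws, Bool.false_eq_true, if_false]
      rw [ih (i+1) (out ++ [c]) (imap ++ [(i : Int)]) false (by simp)]
      simp

theorem pvALoop_empty : ∀ (cs : List Char) (i : Nat) (lws : Bool),
    pvALoop cs i [] [] lws = pvCont true cs i := by
  intro cs
  induction cs with
  | nil => intro i lws; simp [pvALoop, pvCont]
  | cons c rest ih =>
    intro i lws
    by_cases hws : PySem.Chars.isspace c = true
    · simp only [pvALoop, pvCont, hws, if_true, ne_eq, not_true_eq_false, false_and, if_false]
      exact ih (i+1) true
    · simp only [pvALoop, pvCont, hws, Bool.false_eq_true, if_false, List.nil_append]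
      rw [pvALoop_app rest (i+1) [c] [(i : Int)] false (by simp)]
      simp

theorem pvCont_word : ∀ (cs : List Char) (i : Nat),
    pvCont false cs i =
      ((pvBTakeWord cs i).1 ++ (pvCont false (pvBTakeWord cs i).2.2 (pvBTakeWord cs i).2.1).1,
       pvIdxs i (pvBTakeWord cs i).1 ++ (pvCont false (pvBTakeWord cs i).2.2 (pvBTakeWord cs i).2.1).2) := by
  intro cs
  induction cs with
  | nil => intro i; simp [pvBTakeWord, pvIdxs, pvCont]
  | cons c rest ih =>
    intro i
    by_cases hws : PySem.Chars.isspace c = true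
    · simp [pvBTakeWord, hws, pvIdxs]
    · simp only [pvBTakeWord, hws, Bool.false_eq_true, if_false]
      simp only [pvCont, hws, Bool.false_eq_true, if_false]
      rw [ih (i+1)]
      rw [pvIdxs_cons]
      simp

theorem pvSpans_nil_all_ws : ∀ (cs : List Char) (i : Nat),
    pvSpans cs i = [] → ∀ c ∈ cs, PySem.Chars.isspace c = true := by
  intro cs i
  induction cs, i using pvSpans.induct with
  | case1 i => intro _ c hc; simp at hc
  | case2 c rest i hws ih =>
      intro h x hx
      rw [pvSpans, if_pos hws] at h
      rcases List.mem_cons.mp hx with rfl | hx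
      · exact hws
      · exact ih h x hx
  | case3 c rest i hws p ih =>
      intro h
      rw [pvSpans, if_neg hws] at h
      simp at h

theorem pvCont_skip_ws (d : Char) (r : List Char) (e : Nat) (hd : PySem.Chars.isspace d = true) :
    pvCont true (d :: r) e = pvCont true r (e+1) := by
  simp [pvCont, hd]

theorem pvSpans_skip_ws (d : Char) (r : List Char) (e : Nat) (hd : PySem.Chars.isspace d = true) :
    pvSpans (d :: r) e = pvSpans r (e+1) := by
  rw [pvSpans, if_pos hd]

theorem pvCont_true_eq_ARes : ∀ (cs : List Char) (i : Nat), pvCont true cs i = pvARes cs i := by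
  intro cs i
  induction cs, i using pvSpans.induct with
  | case1 i =>
      have h : pvSpans ([] : List Char) i = [] := by simp [pvSpans]
      rw [pvARes_nil [] i h]
      simp [pvCont]
  | case2 c rest i hws ih =>
      rw [pvCont_skip_ws c rest i hws, ih]
      cases hsp : pvSpans rest (i+1) with
      | nil =>
          rw [pvARes_nil rest (i+1) hsp,
              pvARes_nil (c :: rest) i (by rw [pvSpans_skip_ws c rest i hws]; exact hsp)]
      | cons q r' =>
          obtain ⟨s, w⟩ := q
          have hrest : rest ≠ [] := by intro he; subst he; simp [pvSpans] at hsp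
          rw [pvARes_cons rest (i+1) s w r' hsp,
              pvARes_cons (c :: rest) i s w r' (by rw [pvSpans_skip_ws c rest i hws]; exact hsp),
              pvEndsWS_cons c rest hrest]
  | case3 c rest i hws p ih =>
      rcases hp : pvBTakeWord rest (i+1) with ⟨b, e, r⟩
      have hpp : p = (b, e, r) := hp
      rw [hpp] at ih
      have ih' : pvCont true r e = pvARes r e := ih
      have hcns : PySem.Chars.isspace c = false := by simpa using hws
      have hsplit : rest = b ++ r := by
        have h := pvBTakeWord_split rest (i+1); rw [hp] at h; exact h
      have hend : e = i + 1 + b.length := by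
        have h := pvBTakeWord_end rest (i+1); rw [hp] at h; exact h
      have hchars : ∀ x ∈ b, PySem.Chars.isspace x = false := by
        intro x hx
        have h := pvBTakeWord_chars rest (i+1) x; rw [hp] at h; exact h hx
      have hW : pvCont false rest (i+1)
          = (b ++ (pvCont false r e).1, pvIdxs (i+1) b ++ (pvCont false r e).2) := by
        have h := pvCont_word rest (i+1); rw [hp] at h; exact h
      have hLHS : pvCont true (c :: rest) i
          = (c :: (pvCont false rest (i+1)).1, (i : Int) :: (pvCont false rest (i+1)).2) := by
        simp [pvCont, hws]
      have hspan : pvSpans (c :: rest) i = (i, c :: b) :: pvSpans r e := by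
        rw [pvSpans, if_neg hws]
        simp only [hp]
      rw [hLHS, hW]
      cases r with
      | nil =>
          have hcontnil : pvCont false [] e = ([], []) := by simp [pvCont]
          have hEnds : pvEndsWS (c :: rest) = false := by
            apply pvEndsWS_nonws _ (by simp)
            intro x hx
            rcases List.mem_cons.mp hx with rfl | hx
            · exact hcns
            · exact hchars x (by simpa [hsplit] using hx)
          have hspan0 : pvSpans (c :: rest) i = [(i, c :: b)] := by
            rw [hspan]; simp [pvSpans]
          rw [pvARes_cons (c :: rest) i i (c :: b) [] hspan0, hEnds]
          simp only [Bool.false_eq_true, if_false]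
          rw [hcontnil]
          simp [pvGlue, pvTail, pvIdxs_cons]
      | cons d r2 =>
          have hd : PySem.Chars.isspace d = true := by
            have h := pvBTakeWord_rest_head rest (i+1) d r2; rw [hp] at h; exact h rfl
          have hcontr : pvCont false (d :: r2) e
              = (' ' :: (pvCont true r2 (e+1)).1, (e : Int) :: (pvCont true r2 (e+1)).2) := by
            simp [pvCont, hd]
          have hskip : pvCont true (d :: r2) e = pvCont true r2 (e+1) := pvCont_skip_ws d r2 e hd
          have ih2 : pvCont true r2 (e+1) = pvARes (d :: r2) e := by rw [← hskip]; exact ih'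
          rw [hcontr, ih2]
          have hspr : pvSpans (d :: r2) e = pvSpans r2 (e+1) := pvSpans_skip_ws d r2 e hd
          have hcons : c :: rest = (c :: b) ++ (d :: r2) := by rw [hsplit]; rfl
          cases hsp2 : pvSpans (d :: r2) e with
          | nil =>
              have hall : ∀ x ∈ (d :: r2), PySem.Chars.isspace x = true := by
                intro x hx
                rcases List.mem_cons.mp hx with rfl | hx
                · exact hd
                · exact pvSpans_nil_all_ws r2 (e+1) (by rw [← hspr]; exact hsp2) x hx
              have hEnds : pvEndsWS (c :: rest) = true := by
                rw [hcons, pvEndsWS_append _ _ (by simp)]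
                exact pvEndsWS_allws _ (by simp) hall
              have hspan0 : pvSpans (c :: rest) i = [(i, c :: b)] := by rw [hspan, hsp2]
              rw [pvARes_nil (d :: r2) e hsp2]
              rw [pvARes_cons (c :: rest) i i (c :: b) [] hspan0, hEnds]
              simp only [if_true]
              simp [pvGlue, pvTail, pvIdxs_cons, pvLastEnd, hend]
              all_goals omega
          | cons y sp2 =>
              obtain ⟨ys, yw⟩ := y
              have hr2ne : r2 ≠ [] := by
                intro h2; subst h2; rw [hspr] at hsp2; simp [pvSpans] at hsp2
              have hEnds : pvEndsWS (c :: rest) = pvEndsWS (d :: r2) := by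
                rw [hcons, pvEndsWS_append _ _ (by simp)]
              have hEnds2 : pvEndsWS (d :: r2) = pvEndsWS r2 := pvEndsWS_cons d r2 hr2ne
              have hspanc : pvSpans (c :: rest) i = (i, c :: b) :: (ys, yw) :: sp2 := by
                rw [hspan, hsp2]
              rw [pvARes_cons (d :: r2) e ys yw sp2 hsp2]
              rw [pvARes_cons (c :: rest) i i (c :: b) ((ys, yw) :: sp2) hspanc]
              have hglue : pvGlue ((i, c :: b) :: (ys, yw) :: sp2)
                  = ((c :: b) ++ (' ' :: (pvGlue ((ys, yw) :: sp2)).1),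
                     pvIdxs i (c :: b) ++ ((e : Int) :: (pvGlue ((ys, yw) :: sp2)).2)) := by
                have h2 : i + (c :: b).length = e := by simp [hend]; omega
                show ((c :: b) ++ (pvTail (i + (c :: b).length) ((ys, yw) :: sp2)).1,
                      pvIdxs i (c :: b) ++ (pvTail (i + (c :: b).length) ((ys, yw) :: sp2)).2) = _
                rw [h2, pvTail_glue]
              have hLE : pvLastEnd ((i, c :: b) :: (ys, yw) :: sp2) = pvLastEnd ((ys, yw) :: sp2) :=
                pvLastEnd_cons _ _ (by simp)
              rw [hEnds, hEnds2]
              by_cases hE : pvEndsWS r2 = true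
              · rw [hE]
                simp only [if_true]
                rw [hglue, hLE]
                simp [pvIdxs_cons]
              · rw [Bool.not_eq_true] at hE
                rw [hE]
                simp only [Bool.false_eq_true, if_false]
                rw [hglue]
                simp [pvIdxs_cons]

-- ---- well-formedness of spans and the glued output ----
theorem pvSpans_wf : ∀ (cs : List Char) (i : Nat), pvWordsWF (pvSpans cs i) := by
  intro cs i
  induction cs, i using pvSpans.induct with
  | case1 i => intro p hp; simp [pvSpans] at hp
  | case2 c rest i hws ih =>
      rw [pvSpans_skip_ws c rest i hws]
      exact ih
  | case3 c rest i hws p ih =>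
      intro q hq
      rw [pvSpans, if_neg hws] at hq
      simp only [List.mem_cons] at hq
      rcases hq with rfl | hq
      · refine ⟨by simp, ?_⟩
        intro x hx
        rcases List.mem_cons.mp hx with rfl | hx
        · simpa using hws
        · exact pvBTakeWord_chars rest (i+1) x hx
      · exact ih q hq

theorem pvTail_len : ∀ (sp : List (Nat × List Char)) (pe : Nat),
    (pvTail pe sp).2.length = (pvTail pe sp).1.length := by
  intro sp
  induction sp with
  | nil => intro pe; simp [pvTail]
  | cons q r ih =>
      intro pe
      obtain ⟨s, w⟩ := q
      simp [pvTail, pvIdxs_len, ih (s + w.length)]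

theorem pvGlue_len : ∀ (sp : List (Nat × List Char)), (pvGlue sp).2.length = (pvGlue sp).1.length := by
  intro sp
  cases sp with
  | nil => simp [pvGlue]
  | cons q r =>
      obtain ⟨s, w⟩ := q
      simp [pvGlue, pvIdxs_len, pvTail_len]

theorem pvGlue_head : ∀ (s : Nat) (w : List Char) (r : List (Nat × List Char)),
    pvWordsWF ((s, w) :: r) →
    ∃ c t, (pvGlue ((s, w) :: r)).1 = c :: t ∧ PySem.Chars.isspace c = false := by
  intro s w r hwf
  obtain ⟨hne, hch⟩ := hwf (s, w) (by simp)
  cases w with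
  | nil => exact absurd rfl hne
  | cons c t =>
      exact ⟨c, t ++ (pvTail (s + (c :: t).length) r).1, by simp [pvGlue], hch c (by simp)⟩

theorem pvGlue_last : ∀ (sp : List (Nat × List Char)),
    pvWordsWF sp → sp ≠ [] →
    ∃ c, (pvGlue sp).1.getLast? = some c ∧ PySem.Chars.isspace c = false := by
  intro sp
  induction sp with
  | nil => intro _ h; exact absurd rfl h
  | cons q r ih =>
      intro hwf _
      obtain ⟨s, w⟩ := q
      obtain ⟨hne, hch⟩ := hwf (s, w) (by simp)
      cases r with
      | nil =>
          obtain ⟨lc, hlc⟩ : ∃ lc, w.getLast? = some lc := by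
            cases hw : w.getLast? with
            | none => exact absurd (List.getLast?_eq_none_iff.mp hw) hne
            | some a => exact ⟨a, rfl⟩
          refine ⟨lc, ?_, hch lc (List.mem_of_getLast? hlc)⟩
          simp [pvGlue, pvTail, hlc]
      | cons y r2 =>
          have hwf2 : pvWordsWF (y :: r2) := by
            intro p hp; exact hwf p (by simp [hp])
          obtain ⟨lc, hlc, hlcws⟩ := ih hwf2 (by simp)
          obtain ⟨ys, yw⟩ := y
          refine ⟨lc, ?_, hlcws⟩
          have hGne : (pvGlue ((ys, yw) :: r2)).1 ≠ [] := by
            intro h0; rw [h0] at hlc; simp at hlc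
          rw [show (pvGlue ((s, w) :: (ys, yw) :: r2)).1
              = w ++ (pvTail (s + w.length) ((ys, yw) :: r2)).1 from rfl]
          rw [pvTail_glue]
          rw [pvGetLast?_append _ _ (by simp)]
          rw [show (' ' :: (pvGlue ((ys, yw) :: r2)).1).getLast?
              = ([' '] ++ (pvGlue ((ys, yw) :: r2)).1).getLast? from rfl]
          rw [pvGetLast?_append _ _ hGne]
          exact hlc

-- ---- B-side characterization ----
theorem pvBScan_spec_aux : ∀ (n : Nat) (cs : List Char), cs.length ≤ n →
    ∀ (i : Nat) (w : List (Nat × List Char)) (g : List Nat),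
    pvBScan cs i w g = (w ++ pvSpans cs i, g ++ pvGapsAfter w.getLast? (pvSpans cs i)) := by
  intro n
  induction n with
  | zero =>
      intro cs hlen i w g
      have : cs = [] := by cases cs with | nil => rfl | cons a t => simp at hlen
      subst this
      simp [pvBScan, pvSpans, pvGapsAfter]
  | succ n ih =>
      intro cs hlen i w g
      cases cs with
      | nil => simp [pvBScan, pvSpans, pvGapsAfter]
      | cons c rest =>
          by_cases hws : PySem.Chars.isspace c = true
          · rw [pvBScan, if_pos hws, pvSpans_skip_ws c rest i hws]
            exact ih rest (by simpa using hlen) (i+1) w g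
          · rcases hp : pvBTakeWord rest (i+1) with ⟨b, e, r⟩
            have hrlen : r.length ≤ rest.length := by
              have h := pvBTakeWord_rest_len rest (i+1); rw [hp] at h; exact h
            have hspan : pvSpans (c :: rest) i = (i, c :: b) :: pvSpans r e := by
              rw [pvSpans, if_neg hws]; simp only [hp]
            rw [pvBScan, if_neg hws]
            simp only [hp]
            rw [ih r (by simp at hlen; omega) e (w ++ [(i, c :: b)]) _]
            rw [hspan, List.getLast?_concat]
            cases hw : w.getLast? with
            | none =>
                simp only [pvGapsAfter]
                simp
            | some q =>
                obtain ⟨sp, wp⟩ := q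
                simp only [pvGapsAfter]
                simp

theorem pvBScan_spec : ∀ (cs : List Char) (i : Nat) (w : List (Nat × List Char)) (g : List Nat),
    pvBScan cs i w g = (w ++ pvSpans cs i, g ++ pvGapsAfter w.getLast? (pvSpans cs i)) := by
  intro cs i w g
  exact pvBScan_spec_aux cs.length cs le_rfl i w g

theorem pvFold_tail : ∀ (rest : List (Nat × List Char)) (s : Nat) (w : List Char)
    (o : List Char) (m : List Int),
    (rest.zip (pvGapsAfter (some (s, w)) rest)).foldl
      (fun acc q =>
        (acc.1 ++ [' '] ++ q.1.2,
         acc.2 ++ [(q.2 : Int)] ++ (List.range' q.1.1 q.1.2.length).map (fun k => (k : Int))))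
      (o, m)
    = (o ++ (pvTail (s + w.length) rest).1, m ++ (pvTail (s + w.length) rest).2) := by
  intro rest
  induction rest with
  | nil => intro s w o m; simp [pvGapsAfter, pvTail]
  | cons q r ih =>
      intro s w o m
      obtain ⟨s1, w1⟩ := q
      simp only [pvGapsAfter, List.zip_cons_cons, List.foldl_cons]
      rw [ih s1 w1]
      simp [pvTail, pvIdxs, List.append_assoc]

theorem pvAlt_glue : ∀ (original : String),
    build_normalized_index_map_py_alt original =
      (String.ofList (pvGlue (pvSpans (PySem.Chars.replace (PySem.Chars.replace original.toList ['\r', '\n'] ['\n']) ['\r'] ['\n']) 0)).1,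
       (pvGlue (pvSpans (PySem.Chars.replace (PySem.Chars.replace original.toList ['\r', '\n'] ['\n']) ['\r'] ['\n']) 0)).2) := by
  intro original
  simp only [build_normalized_index_map_py_alt]
  generalize (PySem.Chars.replace (PySem.Chars.replace original.toList ['\r', '\n'] ['\n']) ['\r'] ['\n']) = o
  have h1 : (pvBScan o 0 [] []).1 = pvSpans o 0 := by rw [pvBScan_spec]; simp
  have h2 : (pvBScan o 0 [] []).2 = pvGapsAfter none (pvSpans o 0) := by
    rw [pvBScan_spec]; simp
  rw [h1, h2]
  cases hsp : pvSpans o 0 with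
  | nil => rfl
  | cons q rest =>
      obtain ⟨s0, w0⟩ := q
      rw [pvGapsAfter_none_cons]
      show (String.ofList ((rest.zip (pvGapsAfter (some (s0, w0)) rest)).foldl
          (fun acc q =>
            (acc.1 ++ [' '] ++ q.1.2,
             acc.2 ++ [(q.2 : Int)] ++ (List.range' q.1.1 q.1.2.length).map (fun k => (k : Int))))
          (w0, (List.range' s0 w0.length).map (fun k => (k : Int)))).1,
        ((rest.zip (pvGapsAfter (some (s0, w0)) rest)).foldl
          (fun acc q =>
            (acc.1 ++ [' '] ++ q.1.2,
             acc.2 ++ [(q.2 : Int)] ++ (List.range' q.1.1 q.1.2.length).map (fun k => (k : Int))))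
          (w0, (List.range' s0 w0.length).map (fun k => (k : Int)))).2)
        = (String.ofList (pvGlue ((s0, w0) :: rest)).1, (pvGlue ((s0, w0) :: rest)).2)
      rw [pvFold_tail rest s0 w0 w0 ((List.range' s0 w0.length).map (fun k => (k : Int)))]
      simp [pvGlue, pvIdxs]

-- ---- A's post-processing collapses to the glued output ----
theorem pvA_glue : ∀ (original : String),
    build_normalized_index_map_py original =
      (String.ofList (pvGlue (pvSpans (PySem.Chars.replace (PySem.Chars.replace original.toList ['\r', '\n'] ['\n']) ['\r'] ['\n']) 0)).1,
       (pvGlue (pvSpans (PySem.Chars.replace (PySem.Chars.replace original.toList ['\r', '\n'] ['\n']) ['\r'] ['\n']) 0)).2) := by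
  intro original
  simp only [build_normalized_index_map_py]
  generalize (PySem.Chars.replace (PySem.Chars.replace original.toList ['\r', '\n'] ['\n']) ['\r'] ['\n']) = o
  rw [pvALoop_empty o 0 false, pvCont_true_eq_ARes o 0]
  cases hsp : pvSpans o 0 with
  | nil =>
      have h1 : (pvARes o 0).1 = [] := by rw [pvARes_nil o 0 hsp]
      have h2 : (pvARes o 0).2 = [] := by rw [pvARes_nil o 0 hsp]
      rw [h1, h2]
      rw [show pvALeftTrim ([] : List Char) 0 = 0 from rfl]
      have hrt : pvARightTrim ([] : List Char) 0 (List.length ([] : List Char)) = 0 := by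
        rw [pvARightTrim, if_neg]
        · rfl
        · rintro ⟨hlt2, _⟩
          simp at hlt2
      rw [hrt]
      simp [pvGlue, PySem.Chars.strip, PySem.Chars.lstrip, PySem.Chars.rstrip,
        PySem.List.slice, PySem.List.clampIdx]
  | cons q rest =>
      obtain ⟨s0, w0⟩ := q
      have hwf : pvWordsWF ((s0, w0) :: rest) := by rw [← hsp]; exact pvSpans_wf o 0
      obtain ⟨hc, t, hG1, hcws⟩ := pvGlue_head s0 w0 rest hwf
      obtain ⟨lc, hlast, hlws⟩ := pvGlue_last ((s0, w0) :: rest) hwf (by simp)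
      have hlen := pvGlue_len ((s0, w0) :: rest)
      have hcne : hc ≠ ' ' := by
        intro h; rw [h] at hcws; exact absurd hcws (by decide)
      have hlcne : lc ≠ ' ' := by
        intro h; rw [h] at hlws; exact absurd hlws (by decide)
      have hG1ne : (pvGlue ((s0, w0) :: rest)).1 ≠ [] := by rw [hG1]; simp
      have hstrip0 : PySem.Chars.strip (pvGlue ((s0, w0) :: rest)).1 = (pvGlue ((s0, w0) :: rest)).1 :=
        pvStrip_id _
          (fun c hcl => by rw [hG1] at hcl; injection hcl with hh; rw [← hh]; exact hcws)
          (fun c hcl => by rw [hlast] at hcl; injection hcl with hh; rw [← hh]; exact hlws)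
      have hlt0 : pvALeftTrim (pvGlue ((s0, w0) :: rest)).1 0 = 0 := by
        rw [hG1]; simp [pvALeftTrim, hcne]
      by_cases hE : pvEndsWS o = true
      · have h1 : (pvARes o 0).1 = (pvGlue ((s0, w0) :: rest)).1 ++ [' '] := by
          rw [pvARes_cons o 0 s0 w0 rest hsp, if_pos hE]
        have h2 : (pvARes o 0).2 = (pvGlue ((s0, w0) :: rest)).2 ++ [(pvLastEnd ((s0, w0) :: rest) : Int)] := by
          rw [pvARes_cons o 0 s0 w0 rest hsp, if_pos hE]
        rw [h1, h2]
        have hstrip : PySem.Chars.strip ((pvGlue ((s0, w0) :: rest)).1 ++ [' '])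
            = (pvGlue ((s0, w0) :: rest)).1 :=
          pvStrip_trailing _ hc t hG1 hcws
            (fun c hcl => by rw [hlast] at hcl; injection hcl with hh; rw [← hh]; exact hlws)
        have hltrim : pvALeftTrim ((pvGlue ((s0, w0) :: rest)).1 ++ [' ']) 0 = 0 := by
          rw [hG1]; simp [pvALeftTrim, hcne]
        have hlap : ((pvGlue ((s0, w0) :: rest)).1 ++ [' ']).length
            = (pvGlue ((s0, w0) :: rest)).1.length + 1 := by simp
        have hrtrim : pvARightTrim ((pvGlue ((s0, w0) :: rest)).1 ++ [' ']) 0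
            (((pvGlue ((s0, w0) :: rest)).1 ++ [' ']).length) = (pvGlue ((s0, w0) :: rest)).1.length := by
          rw [hlap]
          exact pvARightTrim_trail _ lc hG1ne hlast hlcne
        rw [hstrip, hltrim, hrtrim, PySem.List.slice_natCast]
        have htake : (((pvGlue ((s0, w0) :: rest)).2 ++ [(pvLastEnd ((s0, w0) :: rest) : Int)]).drop 0).take
            ((pvGlue ((s0, w0) :: rest)).1.length - 0) = (pvGlue ((s0, w0) :: rest)).2 := by
          simp only [List.drop_zero, Nat.sub_zero]
          rw [← hlen]
          exact List.take_left' rfl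
        rw [htake]
      · rw [Bool.not_eq_true] at hE
        have h1 : (pvARes o 0).1 = (pvGlue ((s0, w0) :: rest)).1 := by
          rw [pvARes_cons o 0 s0 w0 rest hsp, if_neg (by simp [hE])]
        have h2 : (pvARes o 0).2 = (pvGlue ((s0, w0) :: rest)).2 := by
          rw [pvARes_cons o 0 s0 w0 rest hsp, if_neg (by simp [hE])]
        rw [h1, h2]
        have hrtrim : pvARightTrim (pvGlue ((s0, w0) :: rest)).1 0
            ((pvGlue ((s0, w0) :: rest)).1.length) = (pvGlue ((s0, w0) :: rest)).1.length :=
          pvARightTrim_noTrail _ lc hlast hlcne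
        rw [hstrip0, hlt0, hrtrim, PySem.List.slice_natCast]
        have htake : (((pvGlue ((s0, w0) :: rest)).2).drop 0).take
            ((pvGlue ((s0, w0) :: rest)).1.length - 0) = (pvGlue ((s0, w0) :: rest)).2 := by
          simp only [List.drop_zero, Nat.sub_zero]
          rw [← hlen, List.take_length]
        rw [htake]

-- ===== VERDICT (by name: the statement is the Claim_ definition above) =====
theorem build_normalized_index_map_py_spec : Claim_equal_build_normalized_index_map_py := by
  intro original _
  unfold Spec_build_normalized_index_map_py
  rw [pvA_glue, pvAlt_glue]
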